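-- pv_equiv track=rewrite | github.com/punkdit/qupy | qupy/dense.py | find
-- ===== SOURCE A (Python) =====
-- def find(items, item, count):
--     #print "FIND(%s, %s, %s)"%(items, item, count)
--     idx = 0
--     while idx < len(items):
--         if items[idx] == item:
--             if count == 0:
--                 #print "\tFIND", idx
--                 return idx
--             count -= 1
--         idx += 1
--     raise ValueError("find(%s, %s, %s)"%(items, item, count))
-- ===== SOURCE B (Python) =====
-- def find(items, item, count):
--     indices = [i for i, x in enumerate(items) if x == item]
--     if 0 <= count < len(indices):
--         return indices[count]
--     raise ValueError("find(%s, %s, %s)"%(items, item, count))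
-- ===== Notes on version B (the rewrite author's own statement) =====
-- stated objective: idiomatic
-- what changed: Replaces the counting while-loop with early return by one enumerate pass collecting all matching indices and then selecting the count-th; Pre_ excludes the inputs on which A raises ValueError (count negative or >= number of occurrences), where B also raises.
import Mathlib
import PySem

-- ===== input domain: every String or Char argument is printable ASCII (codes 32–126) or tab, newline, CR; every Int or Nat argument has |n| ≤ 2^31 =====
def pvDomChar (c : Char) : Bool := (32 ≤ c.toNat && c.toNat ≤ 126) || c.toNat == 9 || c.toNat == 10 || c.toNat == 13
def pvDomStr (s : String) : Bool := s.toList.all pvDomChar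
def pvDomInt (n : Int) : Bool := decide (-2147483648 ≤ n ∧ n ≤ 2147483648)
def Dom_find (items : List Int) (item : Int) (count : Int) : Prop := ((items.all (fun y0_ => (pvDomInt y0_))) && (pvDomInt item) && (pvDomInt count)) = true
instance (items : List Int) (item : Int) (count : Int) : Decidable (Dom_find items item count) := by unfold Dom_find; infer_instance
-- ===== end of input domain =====

-- B replaces A's counting while-loop by an enumerate pass collecting all matching
-- indices, then selecting the count-th (idiomatic; same return value on Pre_).

-- ===== PORT A =====
-- the while loop over idx, with `count` as mutable state; the final `raise` is
-- outside Pre_find, modelled by returning 0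
def findLoop (item : Int) : List Int → Int → Int → Int
  | [], _, _ => 0
  | x :: rest, count, idx =>
    if x = item then
      (if count = 0 then idx else findLoop item rest (count - 1) (idx + 1))
    else findLoop item rest count (idx + 1)

def find (items : List Int) (item : Int) (count : Int) : Int :=
  findLoop item items count 0

-- ===== PORT B =====
-- the `raise` branch is outside Pre_find, modelled by returning 0
def find_alt (items : List Int) (item : Int) (count : Int) : Int :=
  let indices := ((PySem.List.enumerate items).filter (fun p => p.2 == item)).map (fun p => p.1)
  if 0 ≤ count ∧ count < PySem.List.len indices then
    (PySem.List.pyGet? indices count).getD 0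
  else 0

-- ===== PRECONDITION & SPEC =====
-- exactly the inputs on which the Python A returns (otherwise it raises ValueError)
def Pre_find (items : List Int) (item : Int) (count : Int) : Prop :=
  0 ≤ count ∧ count < (items.count item : Int)
instance (items : List Int) (item : Int) (count : Int) : Decidable (Pre_find items item count) := by
  unfold Pre_find; infer_instance

def pvWitness_find : List Int × Int × Int := ([5, 3, 5, 5], 5, 2)

def Spec_find (items : List Int) (item : Int) (count : Int) (out : Int) : Prop := out = find_alt items item count
instance (items : List Int) (item : Int) (count : Int) (out : Int) : Decidable (Spec_find items item count out) := by unfold Spec_find; infer_instance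

-- ===== CLAIM (what is proved, stated in full; the proofs are below) =====
def Claim_equal_find : Prop := ∀ (items : List Int) (item : Int) (count : Int), Dom_find items item count → Pre_find items item count → Spec_find items item count (find items item count)

-- ===== LEMMAS AND PROOFS =====

-- B's index list, as a function of the enumerate start offset
def idxList (item : Int) (items : List Int) (s : Int) : List Int :=
  ((PySem.List.enumerate items s).filter (fun p => p.2 == item)).map (fun p => p.1)

theorem idxList_nil (item : Int) (s : Int) : idxList item [] s = [] := rfl

theorem idxList_cons (item x : Int) (items : List Int) (s : Int) :
    idxList item (x :: items) s =
      if x = item then s :: idxList item items (s + 1) else idxList item items (s + 1) := by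
  simp only [idxList, PySem.List.enumerate, List.filter_cons]
  by_cases h : x = item <;> simp [h]

theorem length_idxList (item : Int) (items : List Int) (s : Int) :
    (idxList item items s).length = items.count item := by
  induction items generalizing s with
  | nil => rfl
  | cons x rest ih =>
    rw [idxList_cons]
    by_cases h : x = item <;> simp [h, ih]

theorem findLoop_eq (item : Int) (items : List Int) :
    ∀ (count s : Int), 0 ≤ count → count < ((idxList item items s).length : Int) →
      findLoop item items count s = (PySem.List.pyGet? (idxList item items s) count).getD 0 := by
  induction items with
  | nil => intro count s h0 hlt; simp [idxList_nil] at hlt; omega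
  | cons x rest ih =>
    intro count s h0 hlt
    rw [idxList_cons] at hlt ⊢
    by_cases hx : x = item
    · simp only [hx, if_pos trivial] at hlt ⊢
      simp only [findLoop, if_true]
      by_cases hc : count = 0
      · simp [hc]
      · rw [if_neg hc]
        rw [ih (count - 1) (s + 1) (by omega) (by simp at hlt ⊢; omega)]
        rw [PySem.List.pyGet?_of_nonneg _ (by omega : (0:Int) ≤ count - 1),
            PySem.List.pyGet?_of_nonneg _ h0]
        have : count.toNat = (count - 1).toNat + 1 := by omega
        rw [this, List.getElem?_cons_succ]
    · simp only [if_neg hx] at hlt ⊢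
      simp only [findLoop, if_neg hx]
      exact ih count (s + 1) h0 hlt

-- ===== VERDICT (by name: the statement is the Claim_ definition above) =====
theorem find_spec : Claim_equal_find := by
  intro items item count _ hpre
  obtain ⟨h0, hlt⟩ := hpre
  unfold Spec_find find find_alt
  have hlen : ((idxList item items 0).length : Int) = (items.count item : Int) := by
    exact_mod_cast length_idxList item items 0
  rw [show ((PySem.List.enumerate items).filter (fun p => p.2 == item)).map (fun p => p.1)
        = idxList item items 0 from rfl]
  rw [if_pos ⟨h0, by rw [PySem.List.len_eq]; omega⟩]
  exact findLoop_eq item items count 0 h0 (by omega)
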